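-- pv_equiv track=rewrite | github.com/Bardicus-Kilgore/campaign-manager | extraction/03_parse_spells.py | parse_stat_line
-- ===== SOURCE A (Python) =====
-- STAT_PREFIXES = [
--     'Traditions', 'Cast', 'Requirements', 'Trigger',
--     'Range', 'Area', 'Targets', 'Duration', 'Defense',
-- ]
--
-- def parse_stat_line(line, spell):
--     """
--     Parse a stat-block line (may contain multiple fields separated by ;).
--     Updates spell dict in place. Returns True if it matched anything.
--     """
--     # Split on semicolons to get individual field chunks
--     chunks = [c.strip() for c in line.split(';') if c.strip()]
--     matched = False
--
--     for chunk in chunks: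
--         for prefix in STAT_PREFIXES:
--             if chunk.startswith(prefix + ' ') or chunk == prefix:
--                 value = chunk[len(prefix):].strip()
--                 if prefix == 'Traditions':
--                     spell['traditions'] = value
--                 elif prefix == 'Cast':
--                     spell['cast'] = value
--                 elif prefix == 'Range':
--                     spell['range'] = value
--                 elif prefix == 'Area':
--                     spell['area'] = value
--                 elif prefix == 'Targets':
--                     spell['targets'] = value
--                 elif prefix == 'Duration':
--                     spell['duration'] = value
--                 elif prefix == 'Defense':
--                     spell['defense'] = value
--                 elif prefix == 'Trigger':
--                     spell['trigger'] = value
--                 elif prefix == 'Requirements':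
--                     spell['requirements'] = value
--                 matched = True
--                 break  # found prefix for this chunk
--
--     return matched
-- ===== SOURCE B (Python) =====
-- PREFIX_TO_KEY = {
--     'Traditions': 'traditions', 'Cast': 'cast', 'Requirements': 'requirements',
--     'Trigger': 'trigger', 'Range': 'range', 'Area': 'area',
--     'Targets': 'targets', 'Duration': 'duration', 'Defense': 'defense',
-- }
--
-- def parse_stat_line(line, spell):
--     """Prefix-major version: one outer pass per known field over the chunk list,
--     collecting every chunk carrying that field and keeping the last value
--     (same overwrite-on-repeat result as the original chunk-major scan).
--     Updates spell in place; returns True iff any field was found."""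
--     chunks = [c.strip() for c in line.split(';')]
--     matched = False
--     for prefix, key in PREFIX_TO_KEY.items():
--         vals = [c[len(prefix):].strip() for c in chunks
--                 if c == prefix or c.startswith(prefix + ' ')]
--         if vals:
--             spell[key] = vals[-1]
--             matched = True
--     return matched
-- ===== Notes on version B (the rewrite author's own statement) =====
-- stated objective: alternative
-- what changed: Loop interchange: instead of scanning each chunk against the 9 prefixes with a break and an if/elif chain, B iterates prefix-major, collecting per field every matching chunk in one comprehension and keeping the last value.
import Mathlib
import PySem

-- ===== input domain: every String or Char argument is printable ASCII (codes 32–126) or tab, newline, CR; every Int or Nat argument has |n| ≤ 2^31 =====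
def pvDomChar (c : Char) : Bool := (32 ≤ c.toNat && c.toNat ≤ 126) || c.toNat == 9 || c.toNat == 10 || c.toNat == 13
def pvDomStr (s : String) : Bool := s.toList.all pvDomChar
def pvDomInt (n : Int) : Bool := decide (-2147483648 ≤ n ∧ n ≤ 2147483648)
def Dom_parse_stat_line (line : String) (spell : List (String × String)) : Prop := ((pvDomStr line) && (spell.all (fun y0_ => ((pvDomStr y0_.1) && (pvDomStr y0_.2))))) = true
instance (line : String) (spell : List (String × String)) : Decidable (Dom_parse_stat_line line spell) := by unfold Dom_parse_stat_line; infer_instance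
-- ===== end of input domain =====

set_option maxRecDepth 8000
set_option maxHeartbeats 1000000


-- B interchanges the loops: prefix-major over the chunk list, keeping the last matching value per
-- field, instead of A's chunk-major scan over the 9 prefixes with a break and an if/elif chain.
-- Both Pythons mutate the spell dict; the equivalence proved here is about the returned Bool
-- (the final key→value contents also coincide, only the insertion order of new keys can differ).
-- Strings are handled as their code-point lists (PySem.Chars), exact on the ASCII domain.

-- ===== PORT A =====
def STAT_PREFIXES : List (List Char) :=
  ["Traditions".toList, "Cast".toList, "Requirements".toList, "Trigger".toList,
   "Range".toList, "Area".toList, "Targets".toList, "Duration".toList, "Defense".toList]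

-- the inner `for prefix in STAT_PREFIXES` loop with its break: returns the updated dict on the
-- first matching prefix (matched := true at the call site), none if no prefix matches the chunk
def pvA_inner (prefixes : List (List Char)) (chunk : List Char)
    (spell : PySem.Dict String String) : Option (PySem.Dict String String) :=
  match prefixes with
  | [] => none
  | p :: rest =>
    if PySem.Chars.startswith chunk (p ++ [' ']) || chunk == p then
      let value := String.ofList (PySem.Chars.strip (PySem.Chars.slice chunk (some (PySem.Chars.len p)) none))
      some (if p == "Traditions".toList then spell.insert "traditions" value
            else if p == "Cast".toList then spell.insert "cast" value
            else if p == "Range".toList then spell.insert "range" value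
            else if p == "Area".toList then spell.insert "area" value
            else if p == "Targets".toList then spell.insert "targets" value
            else if p == "Duration".toList then spell.insert "duration" value
            else if p == "Defense".toList then spell.insert "defense" value
            else if p == "Trigger".toList then spell.insert "trigger" value
            else if p == "Requirements".toList then spell.insert "requirements" value
            else spell)
    else pvA_inner rest chunk spell

-- the loop body of `for chunk in chunks` (st = (spell, matched))
def pvA_step (st : PySem.Dict String String × Bool) (chunk : List Char) :
    PySem.Dict String String × Bool :=
  match pvA_inner STAT_PREFIXES chunk st.1 with
  | some d  => (d, true)
  | none    => st

def parse_stat_line (line : String) (spell : List (String × String)) : Bool :=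
  let chunks := ((PySem.Chars.splitOn line.toList ";".toList).filter
      (fun c => PySem.Chars.strip c ≠ [])).map PySem.Chars.strip
  (chunks.foldl pvA_step (PySem.Dict.mk spell, false)).2

-- ===== PORT B =====
def PREFIX_TO_KEY : List (List Char × String) :=
  [("Traditions".toList, "traditions"), ("Cast".toList, "cast"),
   ("Requirements".toList, "requirements"), ("Trigger".toList, "trigger"),
   ("Range".toList, "range"), ("Area".toList, "area"),
   ("Targets".toList, "targets"), ("Duration".toList, "duration"),
   ("Defense".toList, "defense")]

-- the body of B's outer `for prefix, key in PREFIX_TO_KEY.items()` loop: build the list of values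
-- of this field over all chunks, then keep vals[-1] (ported as getLast!, taken in the nonempty branch)
def pvB_step (chunks : List (List Char)) (st : PySem.Dict String String × Bool)
    (pk : List Char × String) : PySem.Dict String String × Bool :=
  let vals := (chunks.filter
      (fun c => c == pk.1 || PySem.Chars.startswith c (pk.1 ++ [' ']))).map
      (fun c => String.ofList (PySem.Chars.strip (PySem.Chars.slice c (some (PySem.Chars.len pk.1)) none)))
  if vals ≠ [] then (st.1.insert pk.2 vals.getLast!, true) else st

def parse_stat_line_alt (line : String) (spell : List (String × String)) : Bool :=
  let chunks := (PySem.Chars.splitOn line.toList ";".toList).map PySem.Chars.strip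
  (PREFIX_TO_KEY.foldl (pvB_step chunks) (PySem.Dict.mk spell, false)).2

-- ===== PRECONDITION & SPEC =====
def Spec_parse_stat_line (line : String) (spell : List (String × String)) (out : Bool) : Prop := out = parse_stat_line_alt line spell
instance (line : String) (spell : List (String × String)) (out : Bool) : Decidable (Spec_parse_stat_line line spell out) := by unfold Spec_parse_stat_line; infer_instance

-- ===== CLAIM (what is proved, stated in full; the proofs are below) =====
def Claim_equal_parse_stat_line : Prop := ∀ (line : String) (spell : List (String × String)), Dom_parse_stat_line line spell → Spec_parse_stat_line line spell (parse_stat_line line spell)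

-- ===== LEMMAS AND PROOFS =====

-- a chunk matches prefix p (p space-free) A-style iff p is exactly the chunk's first space-delimited word
theorem head_match (p cs : List Char) (hp : ' ' ∉ p) :
    ((p ++ [' ']) <+: cs ∨ cs = p) ↔ cs.takeWhile (fun c => c ≠ ' ') = p := by
  induction p generalizing cs with
  | nil =>
    cases cs with
    | nil => simp
    | cons c cs' =>
      by_cases h : c = ' '
      · have h' : (' ' : Char) = c := h.symm
        simp [List.cons_prefix_cons, h]
      · have h' : ¬ (' ' : Char) = c := fun hh => h hh.symm
        simp [List.cons_prefix_cons, h, h']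
  | cons a p' ih =>
    have ha : ¬ a = ' ' := by intro h; exact hp (by simp [h])
    cases cs with
    | nil => simp
    | cons c cs' =>
      have ihs := ih cs' (fun hx => hp (List.mem_cons_of_mem _ hx))
      by_cases hc : c = ' '
      · subst hc
        have ha' : ¬ (' ' : Char) = a := fun hh => ha hh.symm
        simp [List.cons_prefix_cons, ha, ha']
      · have hTW : List.takeWhile (fun c => decide (c ≠ ' ')) (c :: cs')
            = c :: List.takeWhile (fun c => decide (c ≠ ' ')) cs' := by
          simp [hc]
        rw [List.cons_append]
        constructor
        · rintro (hpre | heq)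
          · obtain ⟨rfl, h2⟩ := List.cons_prefix_cons.mp hpre
            rw [hTW]
            exact congrArg _ (ihs.mp (Or.inl h2))
          · injection heq with h1 h2
            subst h1
            rw [hTW]
            exact congrArg _ (ihs.mp (Or.inr h2))
        · intro h
          rw [hTW] at h
          injection h with h1 h2
          rcases ihs.mpr h2 with h3 | h3
          · exact Or.inl (List.cons_prefix_cons.mpr ⟨h1.symm, h3⟩)
          · exact Or.inr (by rw [h1, h3])

theorem cond_iff (p : List Char) (hp : ' ' ∉ p) (chunk : List Char) :
    (PySem.Chars.startswith chunk (p ++ [' ']) = true ∨ chunk = p)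
      ↔ p = chunk.takeWhile (fun c => c ≠ ' ') := by
  rw [PySem.Chars.startswith_iff, eq_comm (a := p)]
  exact head_match p chunk hp

-- A's scan succeeds for a space-free prefix list iff the chunk's first word is in the list
theorem pvA_inner_isSome (ps : List (List Char)) (hp : ∀ p ∈ ps, ' ' ∉ p)
    (chunk : List Char) (d : PySem.Dict String String) :
    (pvA_inner ps chunk d).isSome = ps.contains (chunk.takeWhile (fun c => c ≠ ' ')) := by
  induction ps with
  | nil => rfl
  | cons p rest ih =>
    have hiff := cond_iff p (hp p List.mem_cons_self) chunk
    simp only [pvA_inner, List.contains_cons]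
    by_cases hcond : p = chunk.takeWhile (fun c => c ≠ ' ')
    · have hb : (PySem.Chars.startswith chunk (p ++ [' ']) || chunk == p) = true := by
        rcases hiff.mpr hcond with h | h
        · simp [h]
        · simp [h]
      rw [if_pos hb]
      simp [hcond]
    · have hb : ¬ ((PySem.Chars.startswith chunk (p ++ [' ']) || chunk == p) = true) := by
        intro hb
        exact hcond (hiff.mp (by simpa using hb))
      rw [if_neg hb, ih (fun q hq => hp q (List.mem_cons_of_mem _ hq))]
      simp
      exact fun h => absurd h.symm (by simpa using hcond)

-- A's fold computes:  matched ∨ some chunk's first word is a known prefix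
theorem A_fold (chunks : List (List Char)) (d : PySem.Dict String String) (m : Bool) :
    (chunks.foldl pvA_step (d, m)).2
      = (m || chunks.any (fun c => STAT_PREFIXES.contains (c.takeWhile (fun x => x ≠ ' ')))) := by
  induction chunks generalizing d m with
  | nil => simp
  | cons c cs ih =>
    have hs : (pvA_inner STAT_PREFIXES c d).isSome
        = STAT_PREFIXES.contains (c.takeWhile (fun x => x ≠ ' ')) :=
      pvA_inner_isSome STAT_PREFIXES (by intro p hp; fin_cases hp <;> decide) c d
    simp only [List.foldl_cons, List.any_cons, pvA_step]
    cases hA : pvA_inner STAT_PREFIXES c d <;> rw [hA] at hs <;>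
      simp only [Option.isSome] at hs
    · rw [ih, ← hs]
      simp
    · rw [ih, ← hs]
      simp

-- B's fold computes:  matched ∨ some known prefix heads some chunk
theorem B_fold (items : List (List Char × String)) (chunks : List (List Char))
    (d : PySem.Dict String String) (m : Bool) :
    (items.foldl (pvB_step chunks) (d, m)).2
      = (m || items.any (fun pk => chunks.any
          (fun c => c == pk.1 || PySem.Chars.startswith c (pk.1 ++ [' '])))) := by
  induction items generalizing d m with
  | nil => simp
  | cons pk rest ih =>
    simp only [List.foldl_cons, List.any_cons, pvB_step]
    by_cases h : ((chunks.filter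
        (fun c => c == pk.1 || PySem.Chars.startswith c (pk.1 ++ [' ']))).map
        (fun c => String.ofList (PySem.Chars.strip (PySem.Chars.slice c (some (PySem.Chars.len pk.1)) none)))) ≠ []
    · rw [if_pos h, ih]
      have : chunks.any (fun c => c == pk.1 || PySem.Chars.startswith c (pk.1 ++ [' '])) = true := by
        rcases List.exists_mem_of_ne_nil _ h with ⟨v, hv⟩
        rcases List.mem_map.mp hv with ⟨c, hc, _⟩
        exact List.any_eq_true.mpr ⟨c, (List.mem_filter.mp hc).1, (List.mem_filter.mp hc).2⟩
      simp [this]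
    · rw [if_neg h, ih]
      have : chunks.any (fun c => c == pk.1 || PySem.Chars.startswith c (pk.1 ++ [' '])) = false := by
        rw [List.any_eq_false]
        intro c hc hcond
        exact h (by
          intro hnil
          have : c ∈ chunks.filter (fun c => c == pk.1 || PySem.Chars.startswith c (pk.1 ++ [' '])) :=
            List.mem_filter.mpr ⟨hc, hcond⟩
          rw [List.map_eq_nil_iff.mp hnil] at this
          exact absurd this (List.not_mem_nil))
      simp [this]

-- the two existential conditions coincide (the 9 prefixes are nonempty and space-free,
-- an empty chunk matches nothing, and PREFIX_TO_KEY carries exactly STAT_PREFIXES)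
theorem any_eq (raw : List (List Char)) :
    (((raw.filter (fun c => PySem.Chars.strip c ≠ [])).map PySem.Chars.strip).any
        (fun c => STAT_PREFIXES.contains (c.takeWhile (fun x => x ≠ ' '))))
      = (PREFIX_TO_KEY.any (fun pk => ((raw.map PySem.Chars.strip)).any
        (fun c => c == pk.1 || PySem.Chars.startswith c (pk.1 ++ [' '])))) := by
  have hfst : PREFIX_TO_KEY.map Prod.fst = STAT_PREFIXES := by decide
  have hp : ∀ p ∈ STAT_PREFIXES, ' ' ∉ p ∧ p ≠ [] := by intro p hp; fin_cases hp <;> decide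
  rw [Bool.eq_iff_iff]
  simp only [List.any_eq_true, List.mem_map, List.mem_filter, List.contains_iff_mem]
  constructor
  · rintro ⟨c, ⟨r, ⟨hr, hne⟩, rfl⟩, hmem⟩
    have hmem' := hmem
    rw [← hfst] at hmem'
    rcases List.mem_map.mp hmem' with ⟨pk, hpk, hpkw⟩
    refine ⟨pk, hpk, PySem.Chars.strip r, ⟨r, hr, rfl⟩, ?_⟩
    have hps : pk.1 ∈ STAT_PREFIXES := by rw [hpkw]; exact hmem
    rcases (cond_iff pk.1 (hp _ hps).1 (PySem.Chars.strip r)).mpr hpkw with h | h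
    · simp [h]
    · simp [h]
  · rintro ⟨pk, hpk, c, ⟨r, hr, rfl⟩, hcond⟩
    have hps : pk.1 ∈ STAT_PREFIXES := by
      rw [← hfst]; exact List.mem_map.mpr ⟨pk, hpk, rfl⟩
    have hhead : pk.1 = (PySem.Chars.strip r).takeWhile (fun x => x ≠ ' ') := by
      apply (cond_iff pk.1 (hp _ hps).1 (PySem.Chars.strip r)).mp
      rcases Bool.or_eq_true_iff.mp hcond with h | h
      · exact Or.inr (by simpa using h)
      · exact Or.inl h
    have hne : PySem.Chars.strip r ≠ [] := by
      intro h0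
      rw [h0] at hhead
      exact (hp _ hps).2 (by simpa using hhead)
    exact ⟨PySem.Chars.strip r, ⟨r, ⟨hr, decide_eq_true hne⟩, rfl⟩, by rw [← hhead]; exact hps⟩

-- ===== VERDICT (by name: the statement is the Claim_ definition above) =====
theorem parse_stat_line_spec : Claim_equal_parse_stat_line := by
  intro line spell _
  unfold Spec_parse_stat_line parse_stat_line parse_stat_line_alt
  rw [A_fold, B_fold, any_eq]
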